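-- pv_equiv track=rewrite | github.com/byuccl/spydrnet | spydrnet/release.py | _get_second_period_index
-- ===== SOURCE A (Python) =====
-- def _get_second_period_index(string_value):
--     period_count = 0
--     for index, char in enumerate(string_value):
--         if string_value[index] == '.':
--             period_count += 1
--         if period_count == 2:
--             return index
--     return len(string_value)
-- ===== SOURCE B (Python) =====
-- def _get_second_period_index(string_value):
--     idx = [i for i, c in enumerate(string_value) if c == '.']
--     return idx[1] if len(idx) >= 2 else len(string_value)
-- ===== Notes on version B (the rewrite author's own statement) =====
-- stated objective: alternative
-- what changed: Replaces the counter-driven early-return scan with materializing the list of all period positions (enumerate + filter) and indexing its second element.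
import Mathlib
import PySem

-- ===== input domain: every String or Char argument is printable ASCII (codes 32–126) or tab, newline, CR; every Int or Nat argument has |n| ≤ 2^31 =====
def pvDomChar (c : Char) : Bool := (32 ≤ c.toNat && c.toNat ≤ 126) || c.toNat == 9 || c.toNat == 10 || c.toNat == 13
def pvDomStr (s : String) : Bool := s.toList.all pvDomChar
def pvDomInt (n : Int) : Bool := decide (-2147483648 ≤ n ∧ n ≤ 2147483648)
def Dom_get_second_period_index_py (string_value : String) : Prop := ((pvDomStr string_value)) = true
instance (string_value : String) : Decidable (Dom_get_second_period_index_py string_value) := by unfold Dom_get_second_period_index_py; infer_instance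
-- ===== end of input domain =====

-- B replaces A's counter loop with a materialized list of period positions; alternative decomposition, same cost.

-- ===== PORT A =====
-- the enumerate loop with the early return: counts periods, returns the index at which the count reaches 2
def pvALoop : List Char → Int → Nat → Option Int
  | [], _, _ => none
  | c :: cs, idx, cnt =>
    let cnt' := if c == '.' then cnt + 1 else cnt
    if cnt' == 2 then some idx else pvALoop cs (idx + 1) cnt'

def get_second_period_index_py (string_value : String) : Int :=
  match pvALoop string_value.toList 0 0 with
  | some i => i
  | none => (string_value.toList.length : Int)

-- ===== PORT B =====
def get_second_period_index_py_alt (string_value : String) : Int :=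
  let idx := ((PySem.List.enumerate string_value.toList 0).filter (fun p => p.2 == '.')).map (fun p => p.1)
  if h : 2 ≤ idx.length then idx[1] else (string_value.toList.length : Int)

-- ===== PRECONDITION & SPEC =====
def Spec_get_second_period_index_py (string_value : String) (out : Int) : Prop := out = get_second_period_index_py_alt string_value
instance (string_value : String) (out : Int) : Decidable (Spec_get_second_period_index_py string_value out) := by unfold Spec_get_second_period_index_py; infer_instance

-- ===== CLAIM (what is proved, stated in full; the proofs are below) =====
def Claim_equal_get_second_period_index_py : Prop := ∀ (string_value : String), Dom_get_second_period_index_py string_value → Spec_get_second_period_index_py string_value (get_second_period_index_py string_value)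

-- ===== LEMMAS AND PROOFS =====

-- the list of period positions B builds
def pvPos (cs : List Char) (i0 : Int) : List Int :=
  ((PySem.List.enumerate cs i0).filter (fun p => p.2 == '.')).map (fun p => p.1)

theorem pvPos_nil (i0 : Int) : pvPos [] i0 = [] := rfl

theorem pvPos_cons (c : Char) (cs : List Char) (i0 : Int) :
    pvPos (c :: cs) i0 = (if c == '.' then [i0] else []) ++ pvPos cs (i0 + 1) := by
  simp [pvPos, PySem.List.enumerate_cons, List.filter_cons]
  by_cases h : c = '.' <;> simp [h]

theorem pvALoop_one (cs : List Char) (i0 : Int) :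
    pvALoop cs i0 1 = (pvPos cs i0)[0]? := by
  induction cs generalizing i0 with
  | nil => simp [pvALoop, pvPos_nil]
  | cons c cs ih =>
    by_cases h : c = '.'
    · simp [pvALoop, pvPos_cons, h]
    · simp [pvALoop, pvPos_cons, h, ih]

theorem pvALoop_zero (cs : List Char) (i0 : Int) :
    pvALoop cs i0 0 = (pvPos cs i0)[1]? := by
  induction cs generalizing i0 with
  | nil => simp [pvALoop, pvPos_nil]
  | cons c cs ih =>
    by_cases h : c = '.'
    · simp [pvALoop, pvPos_cons, h, pvALoop_one]
    · simp [pvALoop, pvPos_cons, h, ih]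

-- ===== VERDICT (by name: the statement is the Claim_ definition above) =====
theorem get_second_period_index_py_spec : Claim_equal_get_second_period_index_py := by
  intro s _
  show get_second_period_index_py s = get_second_period_index_py_alt s
  unfold get_second_period_index_py get_second_period_index_py_alt
  rw [pvALoop_zero]
  show (match (pvPos s.toList 0)[1]? with | some i => i | none => (s.toList.length : Int)) =
       (if _ : 2 ≤ (pvPos s.toList 0).length then (pvPos s.toList 0)[1] else (s.toList.length : Int))
  split_ifs with h
  · rw [List.getElem?_eq_getElem (by omega)]; rfl
  · rw [List.getElem?_eq_none (by omega)]
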